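-- pv_equiv track=rewrite | github.com/PitchVantage/ASR | tools/PVlm_pre/preprocess_for_lm.py | merge_contractions
-- ===== SOURCE A (Python) =====
-- is_contraction = lambda x: "'" in x and (x.startswith("'") or x.startswith("N"))
--
-- def merge_contractions(sentence):
--     output_tokens = []
--     for i in range(len(sentence)):
--         current_token = sentence[i]
--         if i != len(sentence) - 1 and not is_contraction(current_token):
--             next_token = sentence[i+1]
--             if is_contraction(next_token):
--                 output_tokens.append(current_token + next_token)
--             else:
--                 output_tokens.append(current_token)
--         elif i == len(sentence) - 1 and not is_contraction(current_token):
--             output_tokens.append(current_token)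
--     return output_tokens
-- ===== SOURCE B (Python) =====
-- is_contraction = lambda x: "'" in x and (x.startswith("'") or x.startswith("N"))
--
-- def merge_contractions(sentence):
--     output = []
--     prev_plain = False  # was the previous token a non-contraction?
--     for tok in sentence:
--         if not is_contraction(tok):
--             output.append(tok)
--             prev_plain = True
--         else:
--             if prev_plain:
--                 output[-1] += tok
--             prev_plain = False
--     return output
-- ===== Notes on version B (the rewrite author's own statement) =====
-- stated objective: alternative
-- what changed: Replaced A's indexed loop with lookahead at sentence[i+1] by a single forward state-machine pass that appends non-contractions and merges a contraction onto the last output element when the previous token was a non-contraction; each token is contraction-tested once instead of twice and no indexing is needed.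
import Mathlib
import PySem

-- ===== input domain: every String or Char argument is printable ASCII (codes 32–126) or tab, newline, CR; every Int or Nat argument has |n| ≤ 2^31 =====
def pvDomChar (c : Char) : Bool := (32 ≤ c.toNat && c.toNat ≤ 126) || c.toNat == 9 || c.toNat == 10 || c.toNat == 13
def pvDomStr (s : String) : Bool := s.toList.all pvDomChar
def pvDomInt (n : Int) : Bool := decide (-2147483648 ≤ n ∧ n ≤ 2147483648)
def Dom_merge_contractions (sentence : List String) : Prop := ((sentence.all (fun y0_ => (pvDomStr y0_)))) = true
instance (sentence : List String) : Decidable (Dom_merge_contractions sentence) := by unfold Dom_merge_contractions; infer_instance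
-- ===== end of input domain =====

-- B rewrites A's indexed loop with lookahead as a forward state-machine pass that merges a
-- contraction onto the last output element; objective: alternative decomposition, same cost.

-- ===== PORT A =====
-- is_contraction = lambda x: "'" in x and (x.startswith("'") or x.startswith("N"))
def is_contraction (x : String) : Bool :=
  PySem.Str.isIn "'" x && (PySem.Str.startswith x "'" || PySem.Str.startswith x "N")

-- A's loop over i with the tests `i != len-1` / `i == len-1` and the lookahead sentence[i+1],
-- written as the structural recursion on the list (current token + rest, head of rest = next).
def merge_contractions (sentence : List String) : List String :=
  match sentence with
  | [] => []
  | current :: rest =>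
    if rest ≠ [] ∧ ¬ is_contraction current then
      match rest with
      | next :: _ =>
        if is_contraction next then (current ++ next) :: merge_contractions rest
        else current :: merge_contractions rest
      | [] => merge_contractions rest
    else if rest = [] ∧ ¬ is_contraction current then
      current :: merge_contractions rest
    else
      merge_contractions rest

-- ===== PORT B =====
-- one step of B's loop: state = (output so far, "previous token was a non-contraction")
def mc_step (st : List String × Bool) (tok : String) : List String × Bool :=
  if ¬ is_contraction tok then (st.1 ++ [tok], true)
  else if st.2 then (st.1.dropLast ++ [st.1.getLastD "" ++ tok], false)
  else (st.1, false)

def merge_contractions_alt (sentence : List String) : List String :=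
  (sentence.foldl mc_step ([], false)).1

-- ===== PRECONDITION & SPEC =====
def Spec_merge_contractions (sentence : List String) (out : List String) : Prop := out = merge_contractions_alt sentence
instance (sentence : List String) (out : List String) : Decidable (Spec_merge_contractions sentence out) := by unfold Spec_merge_contractions; infer_instance

-- ===== CLAIM (what is proved, stated in full; the proofs are below) =====
def Claim_equal_merge_contractions : Prop := ∀ (sentence : List String), Dom_merge_contractions sentence → Spec_merge_contractions sentence (merge_contractions sentence)

-- ===== LEMMAS AND PROOFS =====

-- A skips a contraction token wherever it stands
theorem mcA_cons_contraction (t : String) (l : List String) (h : is_contraction t = true) :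
    merge_contractions (t :: l) = merge_contractions l := by
  cases l <;> simp [merge_contractions, h]

-- Joint loop invariant for B's fold:
-- with flag false the fold just appends A's result; with flag true the last accumulated
-- element x is a pending non-contraction that A would still merge with a following contraction.
theorem mc_fold_invariant (l : List String) :
    (∀ out : List String, (l.foldl mc_step (out, false)).1 = out ++ merge_contractions l) ∧
    (∀ (out : List String) (x : String), is_contraction x = false →
      (l.foldl mc_step (out ++ [x], true)).1 = out ++ merge_contractions (x :: l)) := by
  induction l with
  | nil =>
    constructor
    · intro out; simp [merge_contractions]
    · intro out x hx; simp [merge_contractions, hx]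
  | cons u rest ih =>
    obtain ⟨ihF, ihT⟩ := ih
    constructor
    · intro out
      by_cases hu : is_contraction u
      · rw [List.foldl_cons]
        have hstep : mc_step (out, false) u = (out, false) := by simp [mc_step, hu]
        rw [hstep, ihF out, mcA_cons_contraction u rest hu]
      · rw [List.foldl_cons]
        have hstep : mc_step (out, false) u = (out ++ [u], true) := by simp [mc_step, hu]
        rw [hstep]
        exact ihT out u (by simpa using hu)
    · intro out x hx
      by_cases hu : is_contraction u
      · rw [List.foldl_cons]
        have hstep : mc_step (out ++ [x], true) u = (out ++ [x ++ u], false) := by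
          simp [mc_step, hu]
        rw [hstep, ihF (out ++ [x ++ u])]
        have hA : merge_contractions (x :: u :: rest)
            = (x ++ u) :: merge_contractions rest := by
          simp [merge_contractions, hx, hu]
        rw [hA]; simp
      · rw [List.foldl_cons]
        have hstep : mc_step (out ++ [x], true) u = (out ++ [x] ++ [u], true) := by
          simp [mc_step, hu]
        rw [hstep]
        have := ihT (out ++ [x]) u (by simpa using hu)
        rw [this]
        have hA : merge_contractions (x :: u :: rest)
            = x :: merge_contractions (u :: rest) := by
          simp [merge_contractions, hx, hu]
        rw [hA]; simp

-- ===== VERDICT (by name: the statement is the Claim_ definition above) =====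
theorem merge_contractions_spec : Claim_equal_merge_contractions := by
  intro sentence _
  unfold Spec_merge_contractions merge_contractions_alt
  have := (mc_fold_invariant sentence).1 []
  simp at this
  exact this.symm
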